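-- pv_equiv track=rewrite | github.com/MrGugiu/HTOPbuget | log_view.py | format_log_category
-- ===== SOURCE A (Python) =====
-- def format_log_category(categories):
--     """Format log categories for display"""
--     if not categories:
--         return "UNKNOWN"
--
--     priority_order = ['CRITICAL', 'SECURITY', 'NETWORK', 'SYSTEM', 'WARNING']
--     for priority in priority_order:
--         if priority in categories:
--             return priority
--     return categories[0]
-- ===== SOURCE B (Python) =====
-- def format_log_category(categories):
--     """Format log categories for display"""
--     if not categories:
--         return "UNKNOWN"
--     priority_order = ['CRITICAL', 'SECURITY', 'NETWORK', 'SYSTEM', 'WARNING']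
--     rank = {c: i for i, c in enumerate(priority_order)}
--     # min is stable: with all-unknown categories every key ties at 5 and
--     # categories[0] is returned; a known priority always outranks the sentinel.
--     return min(categories, key=lambda c: rank.get(c, len(priority_order)))
-- ===== Notes on version B (the rewrite author's own statement) =====
-- stated objective: idiomatic
-- what changed: Instead of looping over the priority list and probing the categories for membership, B builds a rank dict once and takes min(categories, key=rank.get(..., sentinel)) in a single pass over categories, relying on min's stability for the all-unknown case.
import Mathlib
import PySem

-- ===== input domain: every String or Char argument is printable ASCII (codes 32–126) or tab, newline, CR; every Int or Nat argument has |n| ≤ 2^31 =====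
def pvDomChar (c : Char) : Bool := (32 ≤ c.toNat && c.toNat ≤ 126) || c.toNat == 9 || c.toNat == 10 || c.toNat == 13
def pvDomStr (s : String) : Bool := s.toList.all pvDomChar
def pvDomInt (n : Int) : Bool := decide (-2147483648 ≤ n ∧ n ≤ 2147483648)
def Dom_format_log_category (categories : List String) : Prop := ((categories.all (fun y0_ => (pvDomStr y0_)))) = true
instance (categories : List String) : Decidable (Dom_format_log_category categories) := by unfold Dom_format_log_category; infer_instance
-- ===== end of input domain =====

-- B replaces A's loop-over-priorities-with-membership-probes by a rank dict and a
-- single stable min over the categories (objective: idiomatic one-pass form).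

-- ===== PORT A =====
-- 'for priority in priority_order: if priority in categories: return priority' = find? over the priority list
def format_log_category (categories : List String) : String :=
  if categories = [] then "UNKNOWN"
  else
    match (["CRITICAL", "SECURITY", "NETWORK", "SYSTEM", "WARNING"]).find?
        (fun p => categories.contains p) with
    | some p => p
    | none => PySem.List.pyGetD categories 0 "UNKNOWN"

-- ===== PORT B =====
-- rank = {c: i for i, c in enumerate(priority_order)}, written out as the association list it builds
def pvRank : PySem.Dict String Nat :=
  PySem.Dict.ofList [("CRITICAL", 0), ("SECURITY", 1), ("NETWORK", 2), ("SYSTEM", 3), ("WARNING", 4)]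

-- min(categories, key=…) = PySem.List.min? (first minimal element); it is some _ for every nonempty list
def format_log_category_alt (categories : List String) : String :=
  if categories = [] then "UNKNOWN"
  else
    match PySem.List.min? categories (fun c => pvRank.getD c 5) with
    | some m => m
    | none => "UNKNOWN"

-- ===== PRECONDITION & SPEC =====
def Spec_format_log_category (categories : List String) (out : String) : Prop := out = format_log_category_alt categories
instance (categories : List String) (out : String) : Decidable (Spec_format_log_category categories out) := by unfold Spec_format_log_category; infer_instance

-- ===== CLAIM (what is proved, stated in full; the proofs are below) =====
def Claim_equal_format_log_category : Prop := ∀ (categories : List String), Dom_format_log_category categories → Spec_format_log_category categories (format_log_category categories)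

-- ===== LEMMAS AND PROOFS =====

-- the rank key as a plain if-chain
theorem pvKeyEq (c : String) : pvRank.getD c 5 =
    (if c = "CRITICAL" then 0 else if c = "SECURITY" then 1 else if c = "NETWORK" then 2
     else if c = "SYSTEM" then 3 else if c = "WARNING" then 4 else 5) := by
  simp only [pvRank, PySem.Dict.ofList, PySem.Dict.update, List.foldl_cons, List.foldl_nil,
    PySem.Dict.getD_insert, PySem.Dict.getD_empty]
  split_ifs <;> simp_all

-- min?'s fold keeps the seed when the seed's key is minimal (stability of Python's min)
theorem pvFoldl_keep {α : Type} (key : α → Nat) (t : List α) (c : α)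
    (h : ∀ y ∈ t, key c ≤ key y) :
    t.foldl (fun m x => if key x < key m then x else m) c = c := by
  induction t with
  | nil => rfl
  | cons x xs ih =>
      have hx : ¬ key x < key c := not_lt.mpr (h x (List.mem_cons_self ..))
      simp only [List.foldl_cons, if_neg hx]
      exact ih (fun y hy => h y (List.mem_cons_of_mem _ hy))

-- min? over a cons as a fold from the head
theorem pvMin?_cons {α : Type} (key : α → Nat) (c : α) (t : List α) :
    PySem.List.min? (c :: t) key =
      some (t.foldl (fun m x => if key x < key m then x else m) c) := by
  simp only [PySem.List.min?, List.foldl_cons]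
  induction t generalizing c with
  | nil => rfl
  | cons x xs ih =>
      simp only [List.foldl_cons]
      by_cases h : key x < key c <;> simp [h, ih]

-- the first minimal element under the rank key is the priority with that rank
theorem pvMinIsPriority (L : List String) (m : String) (i : Nat) (p : String)
    (hi : i < 5) (hmem : m ∈ L) (hp : pvRank.getD p 5 = i)
    (hle : pvRank.getD m 5 ≤ i)
    (habsent : ∀ q, pvRank.getD q 5 < i → q ∉ L) : m = p := by
  have hk := pvKeyEq m
  have hklt : pvRank.getD m 5 = i := by
    rcases lt_or_eq_of_le hle with h | h
    · exact absurd hmem (habsent m h)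
    · exact h
  have hkp := pvKeyEq p
  rw [hk] at hklt
  rw [hkp] at hp
  split_ifs at hklt with a b c d e <;> subst hklt <;>
    (split_ifs at hp with a' b' c' d' e' <;> simp_all)

-- ===== VERDICT (by name: the statement is the Claim_ definition above) =====
theorem format_log_category_spec : Claim_equal_format_log_category := by
  intro categories _
  unfold Spec_format_log_category format_log_category format_log_category_alt
  cases categories with
  | nil => rfl
  | cons c t =>
      simp only [reduceCtorEq, if_false]
      rw [pvMin?_cons]
      set m := t.foldl
        (fun m x => if (fun s => pvRank.getD s 5) x < (fun s => pvRank.getD s 5) m then x else m) c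
        with hm
      have hmin : PySem.List.min? (c :: t) (fun s => pvRank.getD s 5) = some m := by
        rw [pvMin?_cons, hm]
      have hmem : m ∈ c :: t := PySem.List.min?_mem hmin
      have hisMin : ∀ y ∈ c :: t, pvRank.getD m 5 ≤ pvRank.getD y 5 :=
        PySem.List.min?_isMin hmin
      by_cases h0 : "CRITICAL" ∈ (c :: t)
      · simp only [List.find?, List.contains_eq_mem, h0, decide_true]
        rw [pvMinIsPriority _ m 0 "CRITICAL" (by omega) hmem (by decide) (hisMin _ h0)
          (fun q hq => by omega)]
      · by_cases h1 : "SECURITY" ∈ (c :: t)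
        · simp only [List.find?, List.contains_eq_mem, h0, h1, decide_true, decide_false]
          rw [pvMinIsPriority _ m 1 "SECURITY" (by omega) hmem (by decide) (hisMin _ h1)
            (fun q hq => by
              have := pvKeyEq q
              have hq0 : q = "CRITICAL" := by
                rw [this] at hq; split_ifs at hq <;> first | assumption | omega
              exact hq0 ▸ h0)]
        · by_cases h2 : "NETWORK" ∈ (c :: t)
          · simp only [List.find?, List.contains_eq_mem, h0, h1, h2, decide_true, decide_false]
            rw [pvMinIsPriority _ m 2 "NETWORK" (by omega) hmem (by decide) (hisMin _ h2)
              (fun q hq => by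
                have := pvKeyEq q
                rw [this] at hq
                split_ifs at hq with a b <;> first
                  | exact (by subst a; exact h0) | exact (by subst b; exact h1) | omega)]
          · by_cases h3 : "SYSTEM" ∈ (c :: t)
            · simp only [List.find?, List.contains_eq_mem, h0, h1, h2, h3, decide_true, decide_false]
              rw [pvMinIsPriority _ m 3 "SYSTEM" (by omega) hmem (by decide) (hisMin _ h3)
                (fun q hq => by
                  have := pvKeyEq q
                  rw [this] at hq
                  split_ifs at hq with a b cc <;> first
                    | exact (by subst a; exact h0) | exact (by subst b; exact h1)
                    | exact (by subst cc; exact h2) | omega)]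
            · by_cases h4 : "WARNING" ∈ (c :: t)
              · simp only [List.find?, List.contains_eq_mem, h0, h1, h2, h3, h4, decide_true,
                  decide_false]
                rw [pvMinIsPriority _ m 4 "WARNING" (by omega) hmem (by decide) (hisMin _ h4)
                  (fun q hq => by
                    have := pvKeyEq q
                    rw [this] at hq
                    split_ifs at hq with a b cc d <;> first
                      | exact (by subst a; exact h0) | exact (by subst b; exact h1)
                      | exact (by subst cc; exact h2) | exact (by subst d; exact h3) | omega)]
              · -- no priority present: every key is the sentinel 5, min is stable at the head
                simp only [List.find?, List.contains_eq_mem, h0, h1, h2, h3, h4, decide_false]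
                have hall : ∀ y ∈ c :: t, pvRank.getD y 5 = 5 := by
                  intro y hy
                  rw [pvKeyEq]
                  split_ifs with a b cc d e
                  · exact absurd (a ▸ hy) h0
                  · exact absurd (b ▸ hy) h1
                  · exact absurd (cc ▸ hy) h2
                  · exact absurd (d ▸ hy) h3
                  · exact absurd (e ▸ hy) h4
                  · rfl
                have hmc : m = c := by
                  rw [hm]
                  exact pvFoldl_keep (fun s => pvRank.getD s 5) t c (fun y hy => by
                    simp only
                    rw [hall c (List.mem_cons_self ..), hall y (List.mem_cons_of_mem _ hy)])
                rw [hmc]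
                simp [PySem.List.pyGetD_zero_cons]
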